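-- pv_equiv track=rewrite | github.com/Omar-Tnt04/edu-nova | tutor_engine/tutor_service.py | _is_no_context_response
-- ===== SOURCE A (Python) =====
-- def _is_no_context_response(text: str) -> bool:
--     lowered = (text or "").strip().lower()
--     if not lowered:
--         return True
--
--     refusal_markers = [
--         "i cannot answer",
--         "i can't answer",
--         "cannot answer from",
--         "can't answer from",
--         "not enough retrieved",
--         "insufficient context",
--         "unrelated to the content",
--         "question seems unrelated",
--     ]
--     return any(marker in lowered for marker in refusal_markers)
-- ===== SOURCE B (Python) =====
-- def _is_no_context_response(text: str) -> bool:
--     lowered = (text or "").strip().lower()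
--     if not lowered:
--         return True
--
--     refusal_markers = [
--         "i cannot answer",
--         "i can't answer",
--         "cannot answer from",
--         "can't answer from",
--         "not enough retrieved",
--         "insufficient context",
--         "unrelated to the content",
--         "question seems unrelated",
--     ]
--     # single left-to-right pass: at each position, test whether some marker starts there
--     for i in range(len(lowered)):
--         if any(lowered.startswith(marker, i) for marker in refusal_markers):
--             return True
--     return False
-- ===== Notes on version B (the rewrite author's own statement) =====
-- stated objective: alternative
-- what changed: Replaces eight independent whole-string substring scans (one per marker) with a single left-to-right pass over the text that tests each position for a marker prefix via startswith with an offset.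
import Mathlib
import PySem

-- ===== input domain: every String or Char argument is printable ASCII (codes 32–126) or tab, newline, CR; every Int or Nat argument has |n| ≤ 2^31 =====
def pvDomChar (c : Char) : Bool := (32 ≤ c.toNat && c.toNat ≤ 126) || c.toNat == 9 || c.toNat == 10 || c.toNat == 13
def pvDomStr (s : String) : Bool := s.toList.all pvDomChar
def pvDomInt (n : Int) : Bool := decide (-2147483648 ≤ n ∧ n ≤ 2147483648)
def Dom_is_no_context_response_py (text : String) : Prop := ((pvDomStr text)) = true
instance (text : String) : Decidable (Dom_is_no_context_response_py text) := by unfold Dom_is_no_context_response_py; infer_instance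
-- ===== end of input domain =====

-- B replaces eight independent substring scans by one left-to-right pass testing each
-- position for a marker prefix (objective: alternative; return value only, no side effects).

def pvMarkers : List String :=
  ["i cannot answer", "i can't answer", "cannot answer from", "can't answer from",
   "not enough retrieved", "insufficient context", "unrelated to the content",
   "question seems unrelated"]

-- ===== PORT A =====
def is_no_context_response_py (text : String) : Bool :=
  let lowered := PySem.Str.lower (PySem.Str.strip text)
  if lowered.toList.isEmpty then true
  else pvMarkers.any (fun marker => PySem.Str.isIn marker lowered)

-- ===== PORT B =====
-- one pass: at each suffix position test whether some marker starts there (startswith(m, i))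
def pvScan : List Char → Bool
  | [] => false
  | c :: t => pvMarkers.any (fun m => m.toList.isPrefixOf (c :: t)) || pvScan t

def is_no_context_response_py_alt (text : String) : Bool :=
  let lowered := PySem.Str.lower (PySem.Str.strip text)
  if lowered.toList.isEmpty then true
  else pvScan lowered.toList

-- ===== PRECONDITION & SPEC =====
def Spec_is_no_context_response_py (text : String) (out : Bool) : Prop := out = is_no_context_response_py_alt text
instance (text : String) (out : Bool) : Decidable (Spec_is_no_context_response_py text out) := by unfold Spec_is_no_context_response_py; infer_instance

-- ===== CLAIM (what is proved, stated in full; the proofs are below) =====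
def Claim_equal_is_no_context_response_py : Prop := ∀ (text : String), Dom_is_no_context_response_py text → Spec_is_no_context_response_py text (is_no_context_response_py text)

-- ===== LEMMAS AND PROOFS =====

theorem pvScan_iff (l : List Char) :
    pvScan l = true ↔ ∃ m ∈ pvMarkers, m.toList <:+: l := by
  induction l with
  | nil =>
    simp only [pvScan]
    constructor
    · intro h; exact absurd h (by decide)
    · rintro ⟨m, hm, hinf⟩
      have : m.toList = [] := List.eq_nil_of_infix_nil hinf
      fin_cases hm <;> simp_all
  | cons c t ih =>
    simp only [pvScan, Bool.or_eq_true, List.any_eq_true, ih]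
    constructor
    · rintro (⟨m, hm, hp⟩ | ⟨m, hm, hi⟩)
      · exact ⟨m, hm, ((List.isPrefixOf_iff_prefix).1 hp).isInfix⟩
      · exact ⟨m, hm, List.infix_cons hi⟩
    · rintro ⟨m, hm, hi⟩
      rcases (List.infix_cons_iff).1 hi with hp | hi'
      · exact Or.inl ⟨m, hm, (List.isPrefixOf_iff_prefix).2 hp⟩
      · exact Or.inr ⟨m, hm, hi'⟩

theorem pv_key (s : String) :
    (if s.toList.isEmpty then true else pvMarkers.any (fun marker => PySem.Str.isIn marker s))
      = (if s.toList.isEmpty then true else pvScan s.toList) := by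
  by_cases h : s.toList.isEmpty
  · simp [h]
  · rw [Bool.not_eq_true] at h
    rw [if_neg (by simp [h]), if_neg (by simp [h])]
    apply Bool.eq_iff_iff.mpr
    rw [pvScan_iff, List.any_eq_true]
    constructor
    · rintro ⟨m, hm, hin⟩
      exact ⟨m, hm, (PySem.Str.isIn_iff_infix m s).1 hin⟩
    · rintro ⟨m, hm, hin⟩
      exact ⟨m, hm, (PySem.Str.isIn_iff_infix m s).2 hin⟩

-- ===== VERDICT (by name: the statement is the Claim_ definition above) =====
theorem is_no_context_response_py_spec : Claim_equal_is_no_context_response_py := by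
  intro text _
  show is_no_context_response_py text = is_no_context_response_py_alt text
  exact pv_key (PySem.Str.lower (PySem.Str.strip text))
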